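-- pv_equiv track=rewrite | github.com/ShagunGoel123/ContentCart-Project | mac/PayTm/Checksum.py | __get_param_string__
-- ===== SOURCE A (Python) =====
-- def __get_param_string__(params):
--     params_string = []
--     for key in sorted(params.keys()):
--         if "REFUND" in params[key] or "|" in params[key]:
--             return ""  # Exit if an invalid param is found
--         value = params[key]
--         params_string.append('' if value == 'null' else str(value))
--     return '|'.join(params_string)
-- ===== SOURCE B (Python) =====
-- def __get_param_string__(params):
--     # Build the result back-to-front: walk the keys in descending order and
--     # prepend each normalised value onto the string built so far, so no
--     # intermediate list and no join are needed.
--     out = None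
--     for key in sorted(params.keys(), reverse=True):
--         value = params[key]
--         if "REFUND" in value or "|" in value:
--             return ""
--         piece = '' if value == 'null' else str(value)
--         out = piece if out is None else piece + '|' + out
--     return '' if out is None else out
-- ===== Notes on version B (the rewrite author's own statement) =====
-- stated objective: alternative
-- what changed: B builds the result back-to-front: it walks the keys in descending sorted order and prepends each normalised value (with a '|' separator) onto an Option-string accumulator, eliminating A's accumulator list and final join.
import Mathlib
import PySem

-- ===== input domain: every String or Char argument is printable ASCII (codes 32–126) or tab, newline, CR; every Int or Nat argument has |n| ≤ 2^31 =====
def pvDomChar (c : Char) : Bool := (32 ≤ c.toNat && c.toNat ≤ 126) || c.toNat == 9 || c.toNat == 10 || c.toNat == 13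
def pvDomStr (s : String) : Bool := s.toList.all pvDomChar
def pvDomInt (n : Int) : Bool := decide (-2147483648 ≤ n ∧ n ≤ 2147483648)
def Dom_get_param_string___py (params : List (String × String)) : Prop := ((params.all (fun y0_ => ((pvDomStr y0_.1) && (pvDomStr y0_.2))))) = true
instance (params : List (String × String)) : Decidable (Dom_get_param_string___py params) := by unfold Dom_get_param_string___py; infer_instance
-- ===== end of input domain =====

-- B builds the result back-to-front: it walks the keys in DESCENDING order and prepends each
-- normalised value (with a '|' separator) onto the string built so far, so A's accumulator
-- list and final join disappear (alternative decomposition, same cost).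

-- ===== PORT A =====
-- A's loop: per ascending sorted key, early-return "" on an invalid value, else append to the list.
def pvLoopA (d : PySem.Dict String String) : List String → List String → String
  | [], acc => PySem.Str.join "|" acc
  | k :: ks, acc =>
    if PySem.Str.isIn "REFUND" (d.getD k "") || PySem.Str.isIn "|" (d.getD k "") then ""
    else pvLoopA d ks (acc ++ [if d.getD k "" = "null" then "" else d.getD k ""])

def get_param_string___py (params : List (String × String)) : String :=
  let d := PySem.Dict.ofList params
  pvLoopA d (PySem.List.sorted d.keys (fun x => x) false) []

-- ===== PORT B =====
-- B's loop: per DESCENDING sorted key, early-return "" on an invalid value, else prepend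
-- the normalised value (plus '|' if something was already built) onto the Option accumulator.
def pvLoopB (d : PySem.Dict String String) : List String → Option String → String
  | [], out => match out with | none => "" | some o => o
  | k :: ks, out =>
    let v := d.getD k ""
    if PySem.Str.isIn "REFUND" v || PySem.Str.isIn "|" v then ""
    else
      let piece := if v = "null" then "" else v
      pvLoopB d ks (some (match out with | none => piece | some o => piece ++ "|" ++ o))

def get_param_string___py_alt (params : List (String × String)) : String :=
  let d := PySem.Dict.ofList params
  pvLoopB d (PySem.List.sorted d.keys (fun x => x) true) none

-- ===== PRECONDITION & SPEC =====
def Spec_get_param_string___py (params : List (String × String)) (out : String) : Prop := out = get_param_string___py_alt params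
instance (params : List (String × String)) (out : String) : Decidable (Spec_get_param_string___py params out) := by unfold Spec_get_param_string___py; infer_instance

-- ===== CLAIM (what is proved, stated in full; the proofs are below) =====
def Claim_equal_get_param_string___py : Prop := ∀ (params : List (String × String)), Dom_get_param_string___py params → Spec_get_param_string___py params (get_param_string___py params)

-- ===== LEMMAS AND PROOFS =====

-- A's loop closed form: "" if any value is invalid, else the join of the normalised values.
theorem pvLoopA_eq (d : PySem.Dict String String) (ks : List String) (acc : List String) :
    pvLoopA d ks acc =
      if ks.any (fun k => PySem.Str.isIn "REFUND" (d.getD k "") || PySem.Str.isIn "|" (d.getD k "")) then ""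
      else PySem.Str.join "|" (acc ++ ks.map (fun k => if d.getD k "" = "null" then "" else d.getD k "")) := by
  induction ks generalizing acc with
  | nil => simp [pvLoopA]
  | cons k ks ih =>
    cases h : (PySem.Str.isIn "REFUND" (d.getD k "") || PySem.Str.isIn "|" (d.getD k "")) with
    | true =>
      simp only [pvLoopA, List.any_cons, h, Bool.true_or, if_true]
    | false =>
      simp only [pvLoopA, List.any_cons, List.map_cons, h, Bool.false_or]
      rw [if_neg Bool.false_ne_true, ih]
      conv_rhs => rw [List.append_cons]

-- folding a "a ++ sep ++ b" element of a join into two elements, on char lists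
theorem chars_join_snoc_glue (sep a b : List Char) (xs : List (List Char)) :
    PySem.Chars.join sep (xs ++ [a ++ sep ++ b]) = PySem.Chars.join sep (xs ++ [a, b]) := by
  induction xs with
  | nil => simp [PySem.Chars.join_singleton, PySem.Chars.join_cons_cons, List.append_assoc]
  | cons x xs ih =>
    cases xs with
    | nil =>
      simp [PySem.Chars.join_singleton, PySem.Chars.join_cons_cons, List.append_assoc]
    | cons y ys =>
      show PySem.Chars.join sep (x :: y :: (ys ++ [a ++ sep ++ b]))
          = PySem.Chars.join sep (x :: y :: (ys ++ [a, b]))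
      rw [List.cons_append] at ih
      rw [PySem.Chars.join_cons_cons, PySem.Chars.join_cons_cons, ih]
      rfl

-- the same glue step for String join
theorem str_join_snoc_glue (a b : String) (xs : List String) :
    PySem.Str.join "|" (xs ++ [a ++ "|" ++ b]) = PySem.Str.join "|" (xs ++ [a, b]) := by
  unfold PySem.Str.join
  congr 1
  simp only [List.map_append, List.map_cons, List.map_nil]
  have h : (a ++ "|" ++ b).toList = a.toList ++ ("|" : String).toList ++ b.toList := by simp
  rw [h]
  exact chars_join_snoc_glue _ _ _ _

-- B's loop closed form: "" if any value is invalid, else the join of the reversed normalised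
-- values with the accumulator (if present) as the final join element.
theorem pvLoopB_eq (d : PySem.Dict String String) (rs : List String) (out : Option String) :
    pvLoopB d rs out =
      if rs.any (fun k => PySem.Str.isIn "REFUND" (d.getD k "") || PySem.Str.isIn "|" (d.getD k "")) then ""
      else PySem.Str.join "|"
        (rs.reverse.map (fun k => if d.getD k "" = "null" then "" else d.getD k "")
          ++ (match out with | none => [] | some o => [o])) := by
  induction rs generalizing out with
  | nil =>
    cases out with
    | none => simp [pvLoopB, PySem.Str.join]
    | some o =>
      simp only [pvLoopB, List.any_nil, if_neg Bool.false_ne_true, List.reverse_nil,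
        List.map_nil, List.nil_append]
      rw [PySem.Str.join]
      simp [PySem.Chars.join_singleton]
  | cons k ks ih =>
    cases h : (PySem.Str.isIn "REFUND" (d.getD k "") || PySem.Str.isIn "|" (d.getD k "")) with
    | true => simp only [pvLoopB, List.any_cons, h, Bool.true_or, if_true]
    | false =>
      simp only [pvLoopB, List.any_cons, h, Bool.false_or, List.reverse_cons,
        List.map_append, List.map_cons, List.map_nil]
      rw [ih]
      cases hks : ks.any (fun k => PySem.Str.isIn "REFUND" (d.getD k "") || PySem.Str.isIn "|" (d.getD k "")) with
      | true => simp
      | false =>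
        cases out with
        | none => simp
        | some o =>
          simp only [Bool.false_eq_true, if_false]
          rw [List.append_assoc]
          exact str_join_snoc_glue _ _ _

-- sorting descending = reverse of sorting ascending, for a Nodup list of strings
theorem sorted_rev_eq_reverse (ks : List String) (h : ks.Nodup) :
    PySem.List.sorted ks (fun x => x) true = (PySem.List.sorted ks (fun x => x) false).reverse := by
  apply PySem.List.sorted_rev_eq_of_perm_of_pairwise_gt
  · exact (List.reverse_perm _).trans (PySem.List.sorted_perm _ _ _)
  · rw [List.pairwise_reverse]
    have hle := PySem.List.sorted_pairwise ks (fun x => x)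
    have hnd : (PySem.List.sorted ks (fun x => x) false).Nodup :=
      (PySem.List.sorted_perm ks (fun x => x) false).nodup_iff.mpr h
    have hne := List.nodup_iff_pairwise_ne.mp hnd
    exact (hle.and hne).imp (fun {a b} hab => lt_of_le_of_ne hab.1 hab.2)

-- ===== VERDICT (by name: the statement is the Claim_ definition above) =====
theorem get_param_string___py_spec : Claim_equal_get_param_string___py := by
  intro params _
  unfold Spec_get_param_string___py get_param_string___py get_param_string___py_alt
  rw [pvLoopA_eq, pvLoopB_eq, sorted_rev_eq_reverse _ (PySem.Dict.nodup_keys_ofList params)]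
  simp
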